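-- pv_equiv track=rewrite | github.com/kylejones200/our_table | generate_shopping_list.py | _get_best_display_unit
-- ===== SOURCE A (Python) =====
-- def _get_best_display_unit(base_quantity, unit1, unit2):
--     """Choose the best unit for display"""
--     if not unit1 and not unit2:
--         return None
--
--     # Prefer the more common/readable unit
--     preferred_units = ['cup', 'tablespoon', 'teaspoon', 'pound', 'ounce', 'piece', 'clove']
--
--     for preferred in preferred_units:
--         if unit1 and preferred in unit1.lower():
--             return unit1
--         if unit2 and preferred in unit2.lower():
--             return unit2
--
--     return unit1 or unit2
-- ===== SOURCE B (Python) =====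
-- def _get_best_display_unit(base_quantity, unit1, unit2):
--     """Choose the best unit for display"""
--     if not unit1 and not unit2:
--         return None
--
--     preferred_units = ['cup', 'tablespoon', 'teaspoon', 'pound', 'ounce', 'piece', 'clove']
--
--     def rank(u):
--         if not u:
--             return len(preferred_units)
--         low = u.lower()
--         for i, p in enumerate(preferred_units):
--             if p in low:
--                 return i
--         return len(preferred_units)
--
--     r1 = rank(unit1)
--     r2 = rank(unit2)
--     if r1 == len(preferred_units) and r2 == len(preferred_units):
--         return unit1 or unit2
--     return unit1 if r1 <= r2 else unit2
-- ===== Notes on version B (the rewrite author's own statement) =====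
-- stated objective: alternative
-- what changed: Instead of one interleaved priority scan testing unit1 then unit2 per preferred unit, B computes a rank (index of the first matching preferred unit, len(list) if none/falsy) for each unit separately and decides with a single comparison r1 <= r2, with the all-miss fallback unit1 or unit2.
import Mathlib
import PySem

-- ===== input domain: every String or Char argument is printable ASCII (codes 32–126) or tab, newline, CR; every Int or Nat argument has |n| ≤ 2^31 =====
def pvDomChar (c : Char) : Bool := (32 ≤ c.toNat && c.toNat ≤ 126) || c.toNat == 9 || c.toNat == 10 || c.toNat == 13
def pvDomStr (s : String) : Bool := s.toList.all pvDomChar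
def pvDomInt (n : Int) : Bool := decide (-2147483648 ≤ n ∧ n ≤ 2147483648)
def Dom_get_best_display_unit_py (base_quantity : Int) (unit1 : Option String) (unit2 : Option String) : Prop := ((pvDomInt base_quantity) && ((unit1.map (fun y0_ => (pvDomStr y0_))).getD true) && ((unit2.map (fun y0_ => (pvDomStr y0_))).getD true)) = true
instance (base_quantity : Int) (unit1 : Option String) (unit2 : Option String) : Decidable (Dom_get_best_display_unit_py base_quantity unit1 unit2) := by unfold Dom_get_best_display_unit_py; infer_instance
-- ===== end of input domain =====

-- B separates per-unit rank computation (index of first matching preferred unit) from a single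
-- comparison, instead of A's interleaved priority scan; objective: alternative decomposition.


-- ===== PORT A =====
-- Python truthiness of an optional string: None and "" are falsy.
def pvTruthy (u : Option String) : Bool :=
  match u with
  | none => false
  | some s => !s.toList.isEmpty

def pvPreferredUnits : List String :=
  ["cup", "tablespoon", "teaspoon", "pound", "ounce", "piece", "clove"]

-- the for-loop over preferred_units: check unit1 then unit2 for each preferred unit
def pvScanA (unit1 unit2 : Option String) : List String → Option String
  | [] => if pvTruthy unit1 then unit1 else unit2          -- `return unit1 or unit2`
  | p :: rest =>
    if pvTruthy unit1 && PySem.Str.isIn p (PySem.Str.lower (unit1.getD "")) then unit1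
    else if pvTruthy unit2 && PySem.Str.isIn p (PySem.Str.lower (unit2.getD "")) then unit2
    else pvScanA unit1 unit2 rest

def get_best_display_unit_py (base_quantity : Int) (unit1 : Option String) (unit2 : Option String) : Option String :=
  if !pvTruthy unit1 && !pvTruthy unit2 then none
  else pvScanA unit1 unit2 pvPreferredUnits

-- ===== PORT B =====
-- rank loop: index of the first preferred unit contained in `low`; 7 = len(preferred_units) if none
def pvRankGo (low : String) (i : Nat) : List String → Nat
  | [] => 7
  | p :: rest => if PySem.Str.isIn p low then i else pvRankGo low (i + 1) rest

def pvRank (u : Option String) : Nat :=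
  match u with
  | none => 7
  | some s => if s.toList.isEmpty then 7 else pvRankGo (PySem.Str.lower s) 0 pvPreferredUnits

def get_best_display_unit_py_alt (base_quantity : Int) (unit1 : Option String) (unit2 : Option String) : Option String :=
  if !pvTruthy unit1 && !pvTruthy unit2 then none
  else
    let r1 := pvRank unit1
    let r2 := pvRank unit2
    if r1 == 7 && r2 == 7 then (if pvTruthy unit1 then unit1 else unit2)
    else if r1 ≤ r2 then unit1 else unit2

-- ===== PRECONDITION & SPEC =====
def Spec_get_best_display_unit_py (base_quantity : Int) (unit1 : Option String) (unit2 : Option String) (out : Option String) : Prop := out = get_best_display_unit_py_alt base_quantity unit1 unit2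
instance (base_quantity : Int) (unit1 : Option String) (unit2 : Option String) (out : Option String) : Decidable (Spec_get_best_display_unit_py base_quantity unit1 unit2 out) := by unfold Spec_get_best_display_unit_py; infer_instance

-- ===== CLAIM (what is proved, stated in full; the proofs are below) =====
def Claim_equal_get_best_display_unit_py : Prop := ∀ (base_quantity : Int) (unit1 : Option String) (unit2 : Option String), Dom_get_best_display_unit_py base_quantity unit1 unit2 → Spec_get_best_display_unit_py base_quantity unit1 unit2 (get_best_display_unit_py base_quantity unit1 unit2)

-- ===== LEMMAS AND PROOFS =====

-- B's rank loop computes findIdx? of the containment predicate (7 when absent)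
theorem pvRankGo_eq (low : String) (L : List String) (i : Nat) :
    pvRankGo low i L =
      (match L.findIdx? (fun p => PySem.Str.isIn p low) with
       | some j => i + j
       | none => 7) := by
  induction L generalizing i with
  | nil => rfl
  | cons p rest ih =>
    rw [pvRankGo, List.findIdx?_cons]
    by_cases h : PySem.Chars.isIn p.toList low.toList = true
    · simp [h]
    · simp only [ih]
      rcases rest.findIdx? (fun p => PySem.Str.isIn p low) with _ | j <;> simp [h] <;>
        simp [Nat.add_comm, Nat.add_left_comm]

theorem pv_findIdx?_lt_length {α : Type} (p : α → Bool) (l : List α) (j : Nat)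
    (h : l.findIdx? p = some j) : j < l.length := by
  induction l generalizing j with
  | nil => simp at h
  | cons a t ih =>
    rw [List.findIdx?_cons] at h
    by_cases hp : p a
    · simp [hp] at h
      simp [List.length_cons]; omega
    · simp only [hp, if_false, Bool.false_eq_true, Option.map_eq_some_iff] at h
      obtain ⟨j', hj', rfl⟩ := h
      have := ih j' hj'
      simp [List.length_cons]; omega

-- A's scan when unit1 is falsy always returns unit2
theorem pvScanA_u1_falsy (u1 u2 : Option String) (h1 : pvTruthy u1 = false) (L : List String) :
    pvScanA u1 u2 L = u2 := by
  induction L with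
  | nil => simp [pvScanA, h1]
  | cons p rest ih =>
    rw [pvScanA, if_neg (by simp [h1])]
    by_cases h : PySem.Chars.isIn p.toList (PySem.Chars.lower (u2.getD "").toList) = true <;>
      by_cases ht : pvTruthy u2 = true <;> simp [h, ht, ih]

-- A's scan when unit2 is falsy always returns unit1 (given unit1 truthy)
theorem pvScanA_u2_falsy (u1 u2 : Option String) (h1 : pvTruthy u1 = true)
    (h2 : pvTruthy u2 = false) (L : List String) :
    pvScanA u1 u2 L = u1 := by
  induction L with
  | nil => simp [pvScanA, h1]
  | cons p rest ih =>
    rw [pvScanA]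
    by_cases h : PySem.Chars.isIn p.toList (PySem.Chars.lower (u1.getD "").toList) = true
    · rw [if_pos (by simp [h1, h])]
    · rw [if_neg (by simp [h]), if_neg (by simp [h2]), ih]

-- A's scan with both units truthy, characterised by the two first-match indices
theorem pvScanA_both (u1 u2 : Option String) (h1 : pvTruthy u1 = true) (h2 : pvTruthy u2 = true)
    (L : List String) :
    pvScanA u1 u2 L =
      (match L.findIdx? (fun p => PySem.Str.isIn p (PySem.Str.lower (u1.getD ""))),
             L.findIdx? (fun p => PySem.Str.isIn p (PySem.Str.lower (u2.getD ""))) with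
       | none, none => u1
       | some _, none => u1
       | none, some _ => u2
       | some j1, some j2 => if j1 ≤ j2 then u1 else u2) := by
  induction L with
  | nil => simp [pvScanA, h1]
  | cons p rest ih =>
    rw [pvScanA, List.findIdx?_cons, List.findIdx?_cons]
    by_cases c1 : PySem.Chars.isIn p.toList (PySem.Chars.lower (u1.getD "").toList) = true
    · rw [if_pos (by simp [h1, c1])]
      by_cases c2 : PySem.Chars.isIn p.toList (PySem.Chars.lower (u2.getD "").toList) = true <;>
        rcases rest.findIdx? (fun p => PySem.Str.isIn p (PySem.Str.lower (u2.getD ""))) with _ | j2 <;>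
          simp [c1, c2]
    · by_cases c2 : PySem.Chars.isIn p.toList (PySem.Chars.lower (u2.getD "").toList) = true
      · rw [if_neg (by simp [c1]), if_pos (by simp [h2, c2])]
        rcases rest.findIdx? (fun p => PySem.Str.isIn p (PySem.Str.lower (u1.getD ""))) with _ | j1 <;>
          simp [c1, c2]
      · rw [if_neg (by simp [c1]), if_neg (by simp [c2]), ih]
        rcases rest.findIdx? (fun p => PySem.Str.isIn p (PySem.Str.lower (u1.getD ""))) with _ | j1 <;>
          rcases rest.findIdx? (fun p => PySem.Str.isIn p (PySem.Str.lower (u2.getD ""))) with _ | j2 <;>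
          simp [c1, c2]

-- pvRank of a truthy unit via findIdx?
theorem pvRank_truthy (u : Option String) (h : pvTruthy u = true) :
    pvRank u =
      (match pvPreferredUnits.findIdx? (fun p => PySem.Str.isIn p (PySem.Str.lower (u.getD ""))) with
       | some j => j
       | none => 7) := by
  cases u with
  | none => simp [pvTruthy] at h
  | some s =>
    simp only [pvTruthy, Bool.not_eq_eq_eq_not, Bool.not_true] at h
    simp [pvRank, h, pvRankGo_eq, Option.getD]

theorem pvRank_falsy (u : Option String) (h : pvTruthy u = false) : pvRank u = 7 := by
  cases u with
  | none => rfl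
  | some s =>
    simp only [pvTruthy, Bool.not_eq_false'] at h
    simp [pvRank, h]

theorem pvRank_le (u : Option String) : pvRank u ≤ 7 := by
  rcases Bool.eq_false_or_eq_true (pvTruthy u) with h | h
  case inr => rw [pvRank_falsy u h]
  case inl =>
    rw [pvRank_truthy u h]
    rcases hf : pvPreferredUnits.findIdx? (fun p => PySem.Str.isIn p (PySem.Str.lower (u.getD ""))) with _ | j
    · simp
    · have := pv_findIdx?_lt_length _ _ _ hf
      simp only [pvPreferredUnits, List.length] at this
      simp; omega

theorem pv_main (u1 u2 : Option String) :
    pvScanA u1 u2 pvPreferredUnits =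
      (let r1 := pvRank u1
       let r2 := pvRank u2
       if r1 == 7 && r2 == 7 then (if pvTruthy u1 then u1 else u2)
       else if r1 ≤ r2 then u1 else u2) := by
  rcases Bool.eq_false_or_eq_true (pvTruthy u1) with h1 | h1 <;>
    rcases Bool.eq_false_or_eq_true (pvTruthy u2) with h2 | h2
  · -- both truthy
    rw [pvScanA_both u1 u2 h1 h2, pvRank_truthy u1 h1, pvRank_truthy u2 h2]
    rcases hf1 : pvPreferredUnits.findIdx? (fun p => PySem.Str.isIn p (PySem.Str.lower (u1.getD ""))) with _ | j1 <;>
      rcases hf2 : pvPreferredUnits.findIdx? (fun p => PySem.Str.isIn p (PySem.Str.lower (u2.getD ""))) with _ | j2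
    · simp [h1]
    · have := pv_findIdx?_lt_length _ _ _ hf2
      simp only [pvPreferredUnits, List.length] at this
      simp only []
      rw [if_neg (by simp; omega), if_neg (by omega)]
    · have := pv_findIdx?_lt_length _ _ _ hf1
      simp only [pvPreferredUnits, List.length] at this
      simp only []
      rw [if_neg (by simp; omega), if_pos (by omega)]
    · have b1 := pv_findIdx?_lt_length _ _ _ hf1
      have b2 := pv_findIdx?_lt_length _ _ _ hf2
      simp only [pvPreferredUnits, List.length] at b1 b2
      simp only []
      conv_rhs => rw [if_neg (by simp; omega)]
  · -- u1 truthy, u2 falsy: A returns u1, B returns u1 in both branches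
    rw [pvScanA_u2_falsy u1 u2 h1 h2, pvRank_falsy u2 h2]
    have := pvRank_le u1
    by_cases h7 : pvRank u1 = 7 <;> simp [h7, h1, this]
  · -- u1 falsy, u2 truthy: A returns u2, B returns u2 in both branches
    rw [pvScanA_u1_falsy u1 u2 h1, pvRank_falsy u1 h1]
    by_cases h7 : pvRank u2 = 7
    · simp [h7, h1]
    · have := pvRank_le u2
      simp only []
      rw [if_neg (by simp [h7]), if_neg (by omega)]
  · -- both falsy
    rw [pvScanA_u1_falsy u1 u2 h1, pvRank_falsy u1 h1, pvRank_falsy u2 h2]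
    simp [h1]

-- ===== VERDICT (by name: the statement is the Claim_ definition above) =====
theorem get_best_display_unit_py_spec : Claim_equal_get_best_display_unit_py := by
  intro bq u1 u2 _
  unfold Spec_get_best_display_unit_py get_best_display_unit_py get_best_display_unit_py_alt
  by_cases h : (!pvTruthy u1 && !pvTruthy u2) = true
  · rw [if_pos h, if_pos h]
  · rw [if_neg h, if_neg h]
    exact pv_main u1 u2
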